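-- pv_equiv track=rewrite | github.com/G3orge07/GOA-Homework | Day 056/Homework/homework_2.py | find_outlier
-- ===== SOURCE A (Python) =====
-- def find_outlier(integers):
--     even_count = 0
--
--     for int in integers:
--         if int %2 == 0:
--             even_count += 1
--
--     if even_count == 1:
--         for num in integers:
--             if num %2 == 0:
--                 return num
--     else:
--         for num in integers:
--             if num % 2 != 0:
--                 return num
-- ===== SOURCE B (Python) =====
-- def find_outlier(integers):
--     first_even = None
--     first_odd = None
--     evens = 0
--     for x in integers:
--         if x % 2 == 0:
--             evens += 1
--             if first_even is None:
--                 first_even = x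
--         else:
--             if first_odd is None:
--                 first_odd = x
--             if evens >= 2:
--                 return first_odd
--     return first_even if evens == 1 else first_odd
-- ===== Notes on version B (the rewrite author's own statement) =====
-- stated objective: alternative
-- what changed: B makes a single pass carrying accumulators (first even seen, first odd seen, even count) and exits early once two evens and an odd are known, replacing A's staged count-pass followed by a second scan.
-- outside the precondition, e.g. on find_outlier([2, 4]): A returns None, B returns None; on find_outlier([]): A returns None, B returns None
import Mathlib
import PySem

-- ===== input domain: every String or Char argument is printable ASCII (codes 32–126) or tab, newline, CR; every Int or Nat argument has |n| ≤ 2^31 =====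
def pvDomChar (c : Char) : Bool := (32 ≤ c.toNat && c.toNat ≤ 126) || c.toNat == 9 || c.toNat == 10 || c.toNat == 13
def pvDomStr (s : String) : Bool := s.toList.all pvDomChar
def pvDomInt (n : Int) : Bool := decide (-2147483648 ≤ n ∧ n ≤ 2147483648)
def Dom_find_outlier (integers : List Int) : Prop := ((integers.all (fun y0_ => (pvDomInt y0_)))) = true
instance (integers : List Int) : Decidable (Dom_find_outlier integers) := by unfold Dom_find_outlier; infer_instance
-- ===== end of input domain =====

-- B is a single accumulator pass with early exit instead of A's count pass plus rescan
-- (objective: alternative decomposition; equivalence is about the return value).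

-- ===== PORT A =====
-- literal port: count evens with a fold, then scan for the first even (if count == 1)
-- or the first odd; Python returns None when the scan finds nothing — excluded by Pre_,
-- the port returns 0 there (unclaimed).
def find_outlier (integers : List Int) : Int :=
  let even_count : Int := integers.foldl (fun acc i => if PySem.Int.mod i 2 == 0 then acc + 1 else acc) 0
  if even_count = 1 then
    (integers.find? (fun num => PySem.Int.mod num 2 == 0)).getD 0
  else
    (integers.find? (fun num => PySem.Int.mod num 2 != 0)).getD 0

-- ===== PORT B =====
-- single pass over the list carrying (first_even, first_odd, evens), with the early
-- return once evens ≥ 2 and an odd is known; Python's fall-through returns None —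
-- excluded by Pre_, the port returns 0 there (unclaimed).
def find_outlier_alt_loop : List Int → Option Int → Option Int → Int → Option Int
  | [], first_even, first_odd, evens =>
      if evens = 1 then first_even else first_odd
  | x :: xs, first_even, first_odd, evens =>
      if PySem.Int.mod x 2 == 0 then
        find_outlier_alt_loop xs (if first_even.isNone then some x else first_even) first_odd (evens + 1)
      else if evens ≥ 2 then (if first_odd.isNone then some x else first_odd)
      else find_outlier_alt_loop xs first_even (if first_odd.isNone then some x else first_odd) evens

def find_outlier_alt (integers : List Int) : Int :=
  (find_outlier_alt_loop integers none none 0).getD 0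

-- ===== PRECONDITION & SPEC =====
-- Pre_ excludes exactly the inputs where both Pythons fall through and return None
-- (not an int): lists whose even count is ≠ 1 and which contain no odd element.
def Pre_find_outlier (integers : List Int) : Prop :=
  integers.countP (fun x => PySem.Int.mod x 2 == 0) = 1 ∨
  (integers.any (fun x => PySem.Int.mod x 2 != 0)) = true
instance (integers : List Int) : Decidable (Pre_find_outlier integers) := by
  unfold Pre_find_outlier; infer_instance

def pvWitness_find_outlier : List Int := [2, 3, 5]

def Spec_find_outlier (integers : List Int) (out : Int) : Prop := out = find_outlier_alt integers
instance (integers : List Int) (out : Int) : Decidable (Spec_find_outlier integers out) := by unfold Spec_find_outlier; infer_instance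

-- ===== CLAIM (what is proved, stated in full; the proofs are below) =====
def Claim_equal_find_outlier : Prop := ∀ (integers : List Int), Dom_find_outlier integers → Pre_find_outlier integers → Spec_find_outlier integers (find_outlier integers)

-- ===== LEMMAS AND PROOFS =====

-- A's counting fold equals countP (shifted by the accumulator).
theorem pv_fold_count (integers : List Int) (acc : Int) :
    integers.foldl (fun acc i => if PySem.Int.mod i 2 == 0 then acc + 1 else acc) acc
      = acc + integers.countP (fun x => PySem.Int.mod x 2 == 0) := by
  induction integers generalizing acc with
  | nil => simp
  | cons x xs ih =>
    simp only [List.foldl_cons, ih, List.countP_cons]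
    by_cases h : PySem.Int.mod x 2 == 0
    · rw [if_pos h, if_pos h]; push_cast; ring
    · rw [if_neg h, if_neg h]; push_cast; ring

-- Invariant of B's loop: it produces the first even carried-or-found if the final even
-- count is exactly 1, else the first odd carried-or-found.
theorem pv_alt_loop_inv (xs : List Int) (fe fo : Option Int) (evens : Int) :
    find_outlier_alt_loop xs fe fo evens =
      if evens + (xs.countP (fun x => PySem.Int.mod x 2 == 0) : Int) = 1 then
        fe.or (xs.find? (fun x => PySem.Int.mod x 2 == 0))
      else
        fo.or (xs.find? (fun x => PySem.Int.mod x 2 != 0)) := by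
  induction xs generalizing fe fo evens with
  | nil => simp [find_outlier_alt_loop]
  | cons x xs ih =>
    simp only [find_outlier_alt_loop]
    by_cases hx : PySem.Int.mod x 2 == 0
    · have hne : ¬ (PySem.Int.mod x 2 != 0) = true := by simp [bne] at hx ⊢; exact hx
      rw [if_pos hx, ih,
          List.find?_cons_of_pos (p := fun y => PySem.Int.mod y 2 == 0) hx,
          List.find?_cons_of_neg (p := fun y => PySem.Int.mod y 2 != 0) hne,
          List.countP_cons, if_pos hx]
      push_cast
      rw [show evens + ((xs.countP (fun y => PySem.Int.mod y 2 == 0) : Int) + 1)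
            = evens + 1 + (xs.countP (fun y => PySem.Int.mod y 2 == 0) : Int) from by ring]
      by_cases hc : evens + 1 + (xs.countP (fun y => PySem.Int.mod y 2 == 0) : Int) = 1
      · rw [if_pos hc, if_pos hc]
        cases fe <;> simp [Option.or]
      · rw [if_neg hc, if_neg hc]
    · have hpos : (PySem.Int.mod x 2 != 0) = true := by simp [bne] at hx ⊢; exact hx
      rw [if_neg hx,
          List.find?_cons_of_neg (p := fun y => PySem.Int.mod y 2 == 0) hx,
          List.find?_cons_of_pos (p := fun y => PySem.Int.mod y 2 != 0) hpos,
          List.countP_cons, if_neg hx, Nat.add_zero]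
      by_cases hev : evens ≥ 2
      · have hne1 : ¬ evens + (xs.countP (fun x => PySem.Int.mod x 2 == 0) : Int) = 1 := by
          have : (0:Int) ≤ (xs.countP (fun x => PySem.Int.mod x 2 == 0) : Int) := Int.natCast_nonneg _
          omega
        rw [if_pos hev, if_neg hne1]
        cases fo <;> simp [Option.or]
      · rw [if_neg hev, ih]
        by_cases hc : evens + (xs.countP (fun y => PySem.Int.mod y 2 == 0) : Int) = 1
        · rw [if_pos hc, if_pos hc]
        · rw [if_neg hc, if_neg hc]
          cases fo <;> simp [Option.or]

-- ===== VERDICT =====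
theorem find_outlier_spec : Claim_equal_find_outlier := by
  intro integers _ _
  simp only [Spec_find_outlier, find_outlier, find_outlier_alt]
  rw [pv_fold_count, pv_alt_loop_inv]
  simp only [Option.or, zero_add]
  by_cases h : (integers.countP (fun x => PySem.Int.mod x 2 == 0) : Int) = 1
  · rw [if_pos h, if_pos h]
  · rw [if_neg h, if_neg h]
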